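-- pv_equiv track=rewrite | github.com/netra-systems/zen | tests/integration/edge_cases_error_scenarios/test_agent_execution_state_corruption.py | _evaluate_inconsistency_handling
-- ===== SOURCE A (Python) =====
-- from typing import Dict, List, Optional, Any
--
-- def _evaluate_inconsistency_handling(validation_result: Dict, scenario: Dict) -> bool:
--     """Evaluate if inconsistency was handled appropriately."""
--     expected_behavior = scenario['expected_behavior']
--     errors = validation_result.get('errors', [])
--
--     if expected_behavior == 'access_denied_or_reset':
--         return any('user' in error.lower() or 'access' in error.lower() for error in errors)
--     elif expected_behavior == 'timestamp_validation_error':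
--         return any('timestamp' in error.lower() or 'time' in error.lower() for error in errors)
--     elif expected_behavior == 'status_validation_error':
--         return any('status' in error.lower() for error in errors)
--     elif expected_behavior == 'resource_validation_error':
--         return any('resource' in error.lower() for error in errors)
--
--     return len(errors) > 0  # Any error detection is better than none
-- ===== SOURCE B (Python) =====
-- # Inverted data flow: one behavior-independent pass classifies every error into
-- # the set of behaviors it signals; the answer is then a membership test of
-- # expected_behavior in that summary set (unknown behaviors fall back to len(errors) > 0).
-- _SIGNALS = (
--     ('user', 'access_denied_or_reset'),
--     ('access', 'access_denied_or_reset'),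
--     ('timestamp', 'timestamp_validation_error'),
--     ('time', 'timestamp_validation_error'),
--     ('status', 'status_validation_error'),
--     ('resource', 'resource_validation_error'),
-- )
-- _KNOWN = frozenset(b for _, b in _SIGNALS)
--
-- def _evaluate_inconsistency_handling(validation_result, scenario):
--     expected_behavior = scenario['expected_behavior']
--     errors = validation_result.get('errors', [])
--     signaled = set()
--     for error in errors:
--         low = error.lower()
--         for kw, behavior in _SIGNALS:
--             if kw in low:
--                 signaled.add(behavior)
--     if expected_behavior in _KNOWN:
--         return expected_behavior in signaled
--     return len(errors) > 0
-- ===== Notes on version B (the rewrite author's own statement) =====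
-- stated objective: alternative
-- what changed: Inverts the data flow: instead of selecting keywords from the behavior and scanning errors with short-circuit, B makes one behavior-independent pass classifying every error into a set of signaled behaviors and then answers by a membership test, with the same len(errors)>0 fallback for unknown behaviors.
import Mathlib
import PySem

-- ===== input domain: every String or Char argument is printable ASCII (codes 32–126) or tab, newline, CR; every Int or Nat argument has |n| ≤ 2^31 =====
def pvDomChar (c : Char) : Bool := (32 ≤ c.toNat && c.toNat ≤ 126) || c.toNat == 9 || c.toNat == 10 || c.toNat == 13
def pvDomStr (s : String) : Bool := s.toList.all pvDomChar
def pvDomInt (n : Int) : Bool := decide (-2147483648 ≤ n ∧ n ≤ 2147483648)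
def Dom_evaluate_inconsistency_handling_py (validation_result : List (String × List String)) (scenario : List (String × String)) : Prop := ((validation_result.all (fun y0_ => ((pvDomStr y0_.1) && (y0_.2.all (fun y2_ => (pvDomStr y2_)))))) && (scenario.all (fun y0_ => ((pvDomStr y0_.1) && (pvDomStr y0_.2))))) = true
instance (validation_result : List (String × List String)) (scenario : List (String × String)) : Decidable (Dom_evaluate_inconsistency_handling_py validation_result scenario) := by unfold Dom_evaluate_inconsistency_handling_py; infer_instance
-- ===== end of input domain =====

-- B inverts A's data flow: one behavior-independent pass classifies every error into the
-- set of behaviors it signals, then a membership test answers (objective: alternative).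

-- ===== PORT A =====
def evaluate_inconsistency_handling_py (validation_result : List (String × List String)) (scenario : List (String × String)) : Bool :=
  match (PySem.Dict.mk scenario).get? "expected_behavior" with
  | none => false  -- KeyError in Python; excluded by Pre_
  | some expected_behavior =>
    let errors := (PySem.Dict.mk validation_result).getD "errors" []
    if expected_behavior == "access_denied_or_reset" then
      errors.any (fun error => PySem.Str.isIn "user" (PySem.Str.lower error) || PySem.Str.isIn "access" (PySem.Str.lower error))
    else if expected_behavior == "timestamp_validation_error" then
      errors.any (fun error => PySem.Str.isIn "timestamp" (PySem.Str.lower error) || PySem.Str.isIn "time" (PySem.Str.lower error))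
    else if expected_behavior == "status_validation_error" then
      errors.any (fun error => PySem.Str.isIn "status" (PySem.Str.lower error))
    else if expected_behavior == "resource_validation_error" then
      errors.any (fun error => PySem.Str.isIn "resource" (PySem.Str.lower error))
    else
      decide (0 < errors.length)

-- ===== PORT B =====
def pvSignals : List (String × String) :=
  [("user", "access_denied_or_reset"),
   ("access", "access_denied_or_reset"),
   ("timestamp", "timestamp_validation_error"),
   ("time", "timestamp_validation_error"),
   ("status", "status_validation_error"),
   ("resource", "resource_validation_error")]

-- the body of B's classification loop: add to `acc` every behavior this error signals
def pvClassify (acc : PySem.Set String) (error : String) : PySem.Set String :=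
  let low := PySem.Str.lower error
  pvSignals.foldl (fun a p => if PySem.Str.isIn p.1 low then PySem.Set.add a p.2 else a) acc

def evaluate_inconsistency_handling_py_alt (validation_result : List (String × List String)) (scenario : List (String × String)) : Bool :=
  match (PySem.Dict.mk scenario).get? "expected_behavior" with
  | none => false  -- KeyError in Python; excluded by Pre_
  | some expected_behavior =>
    let errors := (PySem.Dict.mk validation_result).getD "errors" []
    let signaled : PySem.Set String := errors.foldl pvClassify PySem.Set.empty
    if expected_behavior == "access_denied_or_reset" ||
       expected_behavior == "timestamp_validation_error" ||
       expected_behavior == "status_validation_error" ||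
       expected_behavior == "resource_validation_error" then
      PySem.Set.contains signaled expected_behavior
    else
      decide (0 < errors.length)

-- ===== PRECONDITION & SPEC =====
-- Pre_ excludes scenarios without an 'expected_behavior' key, on which A raises KeyError.
def Pre_evaluate_inconsistency_handling_py (validation_result : List (String × List String)) (scenario : List (String × String)) : Prop :=
  (PySem.Dict.mk scenario).contains "expected_behavior" = true
instance (validation_result : List (String × List String)) (scenario : List (String × String)) : Decidable (Pre_evaluate_inconsistency_handling_py validation_result scenario) := by unfold Pre_evaluate_inconsistency_handling_py; infer_instance

def pvWitness_evaluate_inconsistency_handling_py : (List (String × List String)) × (List (String × String)) :=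
  ([("errors", ["Status mismatch"])], [("expected_behavior", "status_validation_error")])

def Spec_evaluate_inconsistency_handling_py (validation_result : List (String × List String)) (scenario : List (String × String)) (out : Bool) : Prop := out = evaluate_inconsistency_handling_py_alt validation_result scenario
instance (validation_result : List (String × List String)) (scenario : List (String × String)) (out : Bool) : Decidable (Spec_evaluate_inconsistency_handling_py validation_result scenario out) := by unfold Spec_evaluate_inconsistency_handling_py; infer_instance

-- ===== CLAIM (what is proved, stated in full; the proofs are below) =====
def Claim_equal_evaluate_inconsistency_handling_py : Prop := ∀ (validation_result : List (String × List String)) (scenario : List (String × String)), Dom_evaluate_inconsistency_handling_py validation_result scenario → Pre_evaluate_inconsistency_handling_py validation_result scenario → Spec_evaluate_inconsistency_handling_py validation_result scenario (evaluate_inconsistency_handling_py validation_result scenario)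

-- ===== LEMMAS AND PROOFS =====

-- membership after classifying one error
theorem pv_mem_classify (acc : PySem.Set String) (e y : String) :
    y ∈ pvClassify acc e
      ↔ y ∈ acc ∨ ∃ p ∈ pvSignals, PySem.Str.isIn p.1 (PySem.Str.lower e) = true ∧ y = p.2 := by
  unfold pvClassify
  generalize PySem.Str.lower e = low
  induction pvSignals generalizing acc with
  | nil => simp
  | cons q t ih =>
    simp only [List.foldl_cons]
    by_cases hq : PySem.Str.isIn q.1 low = true
    · rw [if_pos hq, ih]
      simp only [PySem.Set.mem_add, List.mem_cons]
      constructor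
      · rintro ((h | h) | ⟨p, hp, hin, hy⟩)
        · exact Or.inl h
        · exact Or.inr ⟨q, Or.inl rfl, hq, h⟩
        · exact Or.inr ⟨p, Or.inr hp, hin, hy⟩
      · rintro (h | ⟨p, hp | hp, hin, hy⟩)
        · exact Or.inl (Or.inl h)
        · subst hp; exact Or.inl (Or.inr hy)
        · exact Or.inr ⟨p, hp, hin, hy⟩
    · rw [if_neg hq, ih]
      simp only [List.mem_cons]
      constructor
      · rintro (h | ⟨p, hp, hin, hy⟩)
        · exact Or.inl h
        · exact Or.inr ⟨p, Or.inr hp, hin, hy⟩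
      · rintro (h | ⟨p, hp | hp, hin, hy⟩)
        · exact Or.inl h
        · subst hp; exact absurd hin hq
        · exact Or.inr ⟨p, hp, hin, hy⟩

-- membership in the summary set built by the classification pass
theorem pv_mem_fold (errors : List String) (acc : PySem.Set String) (y : String) :
    y ∈ errors.foldl pvClassify acc
      ↔ y ∈ acc ∨ ∃ e ∈ errors, ∃ p ∈ pvSignals, PySem.Str.isIn p.1 (PySem.Str.lower e) = true ∧ y = p.2 := by
  induction errors generalizing acc with
  | nil => simp
  | cons e t ih =>
    rw [List.foldl_cons, ih]
    simp only [pv_mem_classify, List.mem_cons]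
    constructor
    · rintro ((h | ⟨p, hp, hin, hy⟩) | ⟨e', he', hrest⟩)
      · exact Or.inl h
      · exact Or.inr ⟨e, Or.inl rfl, p, hp, hin, hy⟩
      · exact Or.inr ⟨e', Or.inr he', hrest⟩
    · rintro (h | ⟨e', he' | he', hrest⟩)
      · exact Or.inl (Or.inl h)
      · subst he'; exact Or.inl (Or.inr hrest)
      · exact Or.inr ⟨e', he', hrest⟩

-- the summary set answers the same question as a direct keyword scan
theorem pv_contains_fold (errors : List String) (b : String) :
    PySem.Set.contains (errors.foldl pvClassify PySem.Set.empty) b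
      = errors.any (fun e => pvSignals.any (fun p => (p.2 == b) && PySem.Str.isIn p.1 (PySem.Str.lower e))) := by
  rw [Bool.eq_iff_iff, PySem.Set.contains_iff, pv_mem_fold]
  simp only [PySem.Set.empty, List.not_mem_nil, false_or, List.any_eq_true,
    Bool.and_eq_true, beq_iff_eq]
  constructor
  · rintro ⟨e, he, p, hp, hin, hy⟩; exact ⟨e, he, p, hp, hy.symm, hin⟩
  · rintro ⟨e, he, p, hp, hy, hin⟩; exact ⟨e, he, p, hp, hin, hy.symm⟩

theorem pv_eq_main (validation_result : List (String × List String)) (scenario : List (String × String)) :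
    evaluate_inconsistency_handling_py validation_result scenario =
    evaluate_inconsistency_handling_py_alt validation_result scenario := by
  unfold evaluate_inconsistency_handling_py evaluate_inconsistency_handling_py_alt
  cases h : (PySem.Dict.mk scenario).get? "expected_behavior" with
  | none => rfl
  | some eb =>
    simp only
    set errors := (PySem.Dict.mk validation_result).getD "errors" [] with herr
    clear_value errors
    by_cases h1 : eb = "access_denied_or_reset"
    · subst h1
      rw [if_pos (by decide), if_pos (by decide), pv_contains_fold]
      refine congrArg errors.any (funext fun e => ?_)
      simp [pvSignals]
    by_cases h2 : eb = "timestamp_validation_error"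
    · subst h2
      rw [if_neg (by decide), if_pos (by decide), if_pos (by decide), pv_contains_fold]
      refine congrArg errors.any (funext fun e => ?_)
      simp [pvSignals]
    by_cases h3 : eb = "status_validation_error"
    · subst h3
      rw [if_neg (by decide), if_neg (by decide), if_pos (by decide), if_pos (by decide), pv_contains_fold]
      refine congrArg errors.any (funext fun e => ?_)
      simp [pvSignals]
    by_cases h4 : eb = "resource_validation_error"
    · subst h4
      rw [if_neg (by decide), if_neg (by decide), if_neg (by decide), if_pos (by decide), if_pos (by decide), pv_contains_fold]
      refine congrArg errors.any (funext fun e => ?_)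
      simp [pvSignals]
    · have g1 : (eb == "access_denied_or_reset") = false := by simp [h1]
      have g2 : (eb == "timestamp_validation_error") = false := by simp [h2]
      have g3 : (eb == "status_validation_error") = false := by simp [h3]
      have g4 : (eb == "resource_validation_error") = false := by simp [h4]
      simp [g1, g2, g3, g4]

-- ===== VERDICT (by name: the statement is the Claim_ definition above) =====
theorem evaluate_inconsistency_handling_py_spec : Claim_equal_evaluate_inconsistency_handling_py := by
  intro vr sc _ _
  exact pv_eq_main vr sc
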